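-- pv_equiv track=rewrite | github.com/tommyfenyx/CalendarioTartessos | CT001.py | es_bisiesto_khayyam
-- ===== SOURCE A (Python) =====
-- def es_bisiesto_khayyam(year):
--     # Calcular el índice dentro del ciclo de 2820 años, usando 457 como año de referencia
--     indice_ciclo = (year - 457) % 2820
--
--     # Definición de los períodos dentro del ciclo de 2820 años
--     periodos = [
--         (128, 7),  # 21 períodos de 128 años con 7 años bisiestos cada uno
--         (29, 7),   # 1 período de 29 años con 7 años bisiestos
--         (33, 8),   # 3 períodos de 33 años con 8 años bisiestos cada uno
--         (132, 7),  # 1 período de 132 años con 7 años bisiestos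
--         (33, 8),   # 2 períodos de 33 años con 8 años bisiestos cada uno
--         (37, 9)    # 1 período de 37 años con 9 años bisiestos
--     ]
--
--     # Recorrer los períodos para encontrar el año correcto
--     for periodo in periodos:
--         if indice_ciclo < periodo[0]:
--             return (indice_ciclo > 1) and ((indice_ciclo - 1) % 4 == 0)
--         else:
--             indice_ciclo -= periodo[0]
--
--     return False
-- ===== SOURCE B (Python) =====
-- # B: precomputed leap-index table for the 392-year head of the 2820-year cycle, then one membership test.
-- _BOUNDS = [0, 128, 157, 190, 322, 355, 392]
--
-- def _offset(i):
--     off = 0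
--     for b in _BOUNDS:
--         if b <= i:
--             off = b
--     return off
--
-- _LEAP = frozenset(i for i in range(392)
--                   if (i - _offset(i)) > 1 and (i - _offset(i) - 1) % 4 == 0)
--
-- def es_bisiesto_khayyam(year):
--     return (year - 457) % 2820 in _LEAP
-- ===== Notes on version B (the rewrite author's own statement) =====
-- stated objective: alternative
-- what changed: Replaces the per-call band walk with subtraction by a precomputed table of leap indices (offsets found via cumulative boundaries) and a single set-membership test per call.
import Mathlib
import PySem

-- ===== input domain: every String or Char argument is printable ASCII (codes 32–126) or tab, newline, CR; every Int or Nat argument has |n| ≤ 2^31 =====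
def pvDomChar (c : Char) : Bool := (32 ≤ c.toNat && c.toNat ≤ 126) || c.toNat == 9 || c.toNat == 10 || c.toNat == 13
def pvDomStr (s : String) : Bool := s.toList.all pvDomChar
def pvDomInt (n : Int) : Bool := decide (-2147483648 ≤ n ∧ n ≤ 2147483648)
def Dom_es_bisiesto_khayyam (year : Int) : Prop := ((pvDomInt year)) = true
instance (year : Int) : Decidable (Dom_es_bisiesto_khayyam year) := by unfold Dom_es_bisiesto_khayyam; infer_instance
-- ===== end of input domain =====

-- B replaces A's per-call band walk by a precomputed table of leap indices and one membership test (alternative decomposition, same exact values).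

-- ===== PORT A =====
-- the 'for periodo in periodos' loop: subtract band widths until indice falls inside one
def esBisAGo (indice : Int) : List (Int × Int) → Bool
  | [] => false
  | p :: rest =>
    if indice < p.1 then (decide (indice > 1)) && (PySem.Int.mod (indice - 1) 4 == 0)
    else esBisAGo (indice - p.1) rest

def es_bisiesto_khayyam (year : Int) : Bool :=
  let indice_ciclo := PySem.Int.mod (year - 457) 2820
  let periodos : List (Int × Int) := [(128, 7), (29, 7), (33, 8), (132, 7), (33, 8), (37, 9)]
  esBisAGo indice_ciclo periodos

-- ===== PORT B =====
def esBisBounds : List Int := [0, 128, 157, 190, 322, 355, 392]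

-- _offset(i): largest boundary ≤ i, found by a flat pass over the boundary table
def esBisOffset (i : Int) : Int :=
  esBisBounds.foldl (fun off b => if b ≤ i then b else off) 0

-- _LEAP: the set of leap indices in range(392)
def esBisLeap : PySem.Set Int :=
  PySem.Set.ofList ((PySem.List.pyRange 0 392 1).filter
    (fun i => decide (i - esBisOffset i > 1) && (PySem.Int.mod (i - esBisOffset i - 1) 4 == 0)))

def es_bisiesto_khayyam_alt (year : Int) : Bool :=
  PySem.Set.contains esBisLeap (PySem.Int.mod (year - 457) 2820)

-- ===== PRECONDITION & SPEC =====
def Spec_es_bisiesto_khayyam (year : Int) (out : Bool) : Prop := out = es_bisiesto_khayyam_alt year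
instance (year : Int) (out : Bool) : Decidable (Spec_es_bisiesto_khayyam year out) := by unfold Spec_es_bisiesto_khayyam; infer_instance

-- ===== CLAIM (what is proved, stated in full; the proofs are below) =====
def Claim_equal_es_bisiesto_khayyam : Prop := ∀ (year : Int), Dom_es_bisiesto_khayyam year → Spec_es_bisiesto_khayyam year (es_bisiesto_khayyam year)

-- ===== LEMMAS AND PROOFS =====

-- both programs depend on the input only through r = (year - 457) % 2820 ∈ [0, 2820)
def esBisCoreA (r : Int) : Bool :=
  esBisAGo r [(128, 7), (29, 7), (33, 8), (132, 7), (33, 8), (37, 9)]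

def esBisCoreB (r : Int) : Bool := PySem.Set.contains esBisLeap r

set_option maxRecDepth 20000 in
theorem esBisCore_eq_small :
    (List.range 392).all (fun n => esBisCoreA (n : Int) == esBisCoreB (n : Int)) = true := by
  decide

theorem esBisCoreA_large (r : Int) (h : 392 ≤ r) : esBisCoreA r = false := by
  unfold esBisCoreA
  simp only [esBisAGo]
  rw [if_neg (by omega), if_neg (by omega), if_neg (by omega), if_neg (by omega),
      if_neg (by omega), if_neg (by omega)]

theorem esBisCoreB_large (r : Int) (h : 392 ≤ r) : esBisCoreB r = false := by
  unfold esBisCoreB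
  rw [Bool.eq_false_iff]
  intro hc
  have hm := (PySem.Set.contains_iff _ _).mp hc
  unfold esBisLeap at hm
  rw [PySem.Set.mem_ofList] at hm
  have := (PySem.List.mem_pyRange_one).mp (List.mem_filter.mp hm).1
  omega

theorem esBisCore_eq (r : Int) (h0 : 0 ≤ r) (h1 : r < 2820) : esBisCoreA r = esBisCoreB r := by
  by_cases h : r < 392
  · have hn : r.toNat < 392 := by omega
    have hr : r = (r.toNat : Int) := by omega
    have hq := List.all_eq_true.mp esBisCore_eq_small r.toNat (List.mem_range.mpr hn)
    rw [hr]
    exact eq_of_beq hq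
  · rw [esBisCoreA_large r (by omega), esBisCoreB_large r (by omega)]

-- ===== VERDICT (by name: the statement is the Claim_ definition above) =====
theorem es_bisiesto_khayyam_spec : Claim_equal_es_bisiesto_khayyam := by
  intro year _
  unfold Spec_es_bisiesto_khayyam es_bisiesto_khayyam es_bisiesto_khayyam_alt
  have h0 : 0 ≤ PySem.Int.mod (year - 457) 2820 := PySem.Int.mod_nonneg _ (by norm_num)
  have h1 : PySem.Int.mod (year - 457) 2820 < 2820 := PySem.Int.mod_lt _ (by norm_num)
  exact esBisCore_eq _ h0 h1
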